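-- pv_equiv track=rewrite | github.com/jfvitas/ProteoSphereV2 | execution/library/protein_summary_reporting.py | _source_fusion_priority_classification
-- ===== SOURCE A (Python) =====
-- from typing import Any
--
-- def _source_fusion_priority_classification(field_statuses: list[dict[str, Any]]) -> str:
--     resolved_count = sum(1 for status in field_statuses if status["status"] == "resolved")
--     conflict_count = sum(1 for status in field_statuses if status["status"] == "conflict")
--     if resolved_count and conflict_count:
--         return "consensus-with-preserved-conflict"
--     if resolved_count:
--         return "mixed-consensus"
--     return "partial-held-back"
-- ===== SOURCE B (Python) =====
-- _TABLE = ("partial-held-back", "mixed-consensus",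
--           "partial-held-back", "consensus-with-preserved-conflict")
--
-- def _source_fusion_priority_classification(field_statuses):
--     mask = 0
--     for status in field_statuses:
--         s = status["status"]
--         mask |= 1 if s == "resolved" else 2 if s == "conflict" else 0
--     return _TABLE[mask]
-- ===== Notes on version B (the rewrite author's own statement) =====
-- stated objective: alternative
-- what changed: Replaces A's two full counting passes and the if-chain with a single pass that ORs a per-element bit (1=resolved, 2=conflict) into a bitmask and returns a 4-entry lookup-table value indexed by the mask.
import Mathlib
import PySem

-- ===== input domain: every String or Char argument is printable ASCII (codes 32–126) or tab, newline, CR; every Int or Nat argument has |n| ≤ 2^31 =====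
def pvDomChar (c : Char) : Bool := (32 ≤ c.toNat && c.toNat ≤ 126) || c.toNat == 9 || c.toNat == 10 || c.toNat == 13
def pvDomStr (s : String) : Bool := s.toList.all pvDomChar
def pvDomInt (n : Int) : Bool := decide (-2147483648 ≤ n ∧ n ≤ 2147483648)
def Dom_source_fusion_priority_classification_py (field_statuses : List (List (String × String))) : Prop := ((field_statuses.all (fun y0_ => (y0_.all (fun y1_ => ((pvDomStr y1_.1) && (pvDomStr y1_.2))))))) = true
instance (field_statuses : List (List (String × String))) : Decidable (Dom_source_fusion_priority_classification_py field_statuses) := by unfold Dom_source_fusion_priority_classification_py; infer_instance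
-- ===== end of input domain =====

-- B replaces A's two counting passes and if-chain with a single pass ORing per-element
-- bits into a mask and a 4-entry lookup table indexed by it (alternative decomposition).


-- ===== PORT A =====
def source_fusion_priority_classification_py (field_statuses : List (List (String × String))) : String :=
  let resolved_count : Int :=
    field_statuses.foldl
      (fun acc status => acc + (if (PySem.Dict.mk status).get? "status" == some "resolved" then 1 else 0)) 0
  let conflict_count : Int :=
    field_statuses.foldl
      (fun acc status => acc + (if (PySem.Dict.mk status).get? "status" == some "conflict" then 1 else 0)) 0
  if resolved_count != 0 && conflict_count != 0 then "consensus-with-preserved-conflict"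
  else if resolved_count != 0 then "mixed-consensus"
  else "partial-held-back"

-- ===== PORT B =====
def pvTable : List String :=
  ["partial-held-back", "mixed-consensus", "partial-held-back", "consensus-with-preserved-conflict"]

def source_fusion_priority_classification_py_alt (field_statuses : List (List (String × String))) : String :=
  let mask : Int :=
    field_statuses.foldl
      (fun m status =>
        let s := (PySem.Dict.mk status).get? "status"
        Int.lor m (if s == some "resolved" then 1 else if s == some "conflict" then 2 else 0)) 0
  -- _TABLE[mask]: mask ∈ {0,1,2,3} always, so pyGet? is some and the default is unreachable
  (PySem.List.pyGet? pvTable mask).getD ""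

-- ===== PRECONDITION & SPEC =====
-- Pre_ excludes exactly the inputs on which Python A raises KeyError: some element lacks a "status" key (B raises there too).
def Pre_source_fusion_priority_classification_py (field_statuses : List (List (String × String))) : Prop :=
  (field_statuses.all (fun status => (PySem.Dict.mk status).contains "status")) = true
instance (field_statuses : List (List (String × String))) : Decidable (Pre_source_fusion_priority_classification_py field_statuses) := by unfold Pre_source_fusion_priority_classification_py; infer_instance

def pvWitness_source_fusion_priority_classification_py : (List (List (String × String))) :=
  [[("status", "resolved")], [("status", "conflict")]]

def Spec_source_fusion_priority_classification_py (field_statuses : List (List (String × String))) (out : String) : Prop := out = source_fusion_priority_classification_py_alt field_statuses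
instance (field_statuses : List (List (String × String))) (out : String) : Decidable (Spec_source_fusion_priority_classification_py field_statuses out) := by unfold Spec_source_fusion_priority_classification_py; infer_instance

-- ===== CLAIM (what is proved, stated in full; the proofs are below) =====
def Claim_equal_source_fusion_priority_classification_py : Prop := ∀ (field_statuses : List (List (String × String))), Dom_source_fusion_priority_classification_py field_statuses → Pre_source_fusion_priority_classification_py field_statuses → Spec_source_fusion_priority_classification_py field_statuses (source_fusion_priority_classification_py field_statuses)

-- ===== LEMMAS AND PROOFS =====

-- each summand is 0 or 1, so A's count is nonnegative
lemma pvSum_nonneg (l : List (List (String × String))) (v : String) :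
    0 ≤ (l.map (fun x => if (PySem.Dict.mk x).get? "status" = some v then (1 : Int) else 0)).sum := by
  induction l with
  | nil => simp
  | cons x xs ih =>
    simp only [List.map_cons, List.sum_cons]
    split <;> omega

-- A's count is nonzero iff some element carries status v
lemma pvCount_ne_zero_iff (l : List (List (String × String))) (v : String) :
    (¬ (l.map (fun x => if (PySem.Dict.mk x).get? "status" = some v then (1 : Int) else 0)).sum = 0)
      ↔ ∃ a ∈ l, (PySem.Dict.mk a).get? "status" = some v := by
  induction l with
  | nil => simp
  | cons x xs ih =>
    have hnn := pvSum_nonneg xs v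
    simp only [List.map_cons, List.sum_cons]
    by_cases h : (PySem.Dict.mk x).get? "status" = some v
    · simp only [h, if_pos]
      constructor
      · intro _; exact ⟨x, List.mem_cons_self, h⟩
      · intro _; omega
    · simp only [h, if_neg, not_false_iff, zero_add, ih]
      constructor
      · rintro ⟨a, ha, hp⟩; exact ⟨a, List.mem_cons_of_mem _ ha, hp⟩
      · rintro ⟨a, ha, hp⟩
        rcases List.mem_cons.mp ha with rfl | ha
        · exact absurd hp h
        · exact ⟨a, ha, hp⟩

-- B's folded mask equals a ||| (resolved bit ||| conflict bit)
lemma pvMask_eq (l : List (List (String × String))) (a : Int)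
    (ha : a = 0 ∨ a = 1 ∨ a = 2 ∨ a = 3) :
    l.foldl
      (fun m status =>
        let s := (PySem.Dict.mk status).get? "status"
        Int.lor m (if s == some "resolved" then 1 else if s == some "conflict" then 2 else 0)) a
    = Int.lor a ((if ∃ x ∈ l, (PySem.Dict.mk x).get? "status" = some "resolved" then (1 : Int) else 0).lor (if ∃ x ∈ l, (PySem.Dict.mk x).get? "status" = some "conflict" then (2 : Int) else 0)) := by
  induction l generalizing a with
  | nil =>
    simp only [List.foldl_nil, List.not_mem_nil, false_and, exists_false, if_neg, not_false_iff]
    rcases ha with rfl | rfl | rfl | rfl <;> decide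
  | cons x xs ih =>
    simp only [List.foldl_cons]
    by_cases h1 : (PySem.Dict.mk x).get? "status" = some "resolved"
    · have hb : ((PySem.Dict.mk x).get? "status" == some "resolved") = true := by simp [h1]
      simp only [hb, if_pos]
      have ha' : Int.lor a 1 = 0 ∨ Int.lor a 1 = 1 ∨ Int.lor a 1 = 2 ∨ Int.lor a 1 = 3 := by
        rcases ha with rfl | rfl | rfl | rfl <;> decide
      rw [ih (Int.lor a 1) ha']
      have hres : (∃ y ∈ x :: xs, (PySem.Dict.mk y).get? "status" = some "resolved") := ⟨x, List.mem_cons_self, h1⟩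
      have hconf : (∃ y ∈ x :: xs, (PySem.Dict.mk y).get? "status" = some "conflict")
          ↔ (∃ y ∈ xs, (PySem.Dict.mk y).get? "status" = some "conflict") := by
        constructor
        · rintro ⟨y, hy, hp⟩
          rcases List.mem_cons.mp hy with rfl | hy
          · rw [h1] at hp; simp at hp
          · exact ⟨y, hy, hp⟩
        · rintro ⟨y, hy, hp⟩; exact ⟨y, List.mem_cons_of_mem _ hy, hp⟩
      simp only [hres, if_pos, hconf]
      by_cases hr : (∃ y ∈ xs, (PySem.Dict.mk y).get? "status" = some "resolved") <;>
        by_cases hc : (∃ y ∈ xs, (PySem.Dict.mk y).get? "status" = some "conflict") <;>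
          simp only [hr, hc, if_pos, if_neg, not_false_iff] <;>
            rcases ha with rfl | rfl | rfl | rfl <;> decide
    · by_cases h2 : (PySem.Dict.mk x).get? "status" = some "conflict"
      · have hb1 : ((PySem.Dict.mk x).get? "status" == some "resolved") = false := by simp [h2]
        have hb2 : ((PySem.Dict.mk x).get? "status" == some "conflict") = true := by simp [h2]
        simp only [hb1, hb2, if_pos, if_neg, Bool.false_eq_true, not_false_iff]
        have ha' : Int.lor a 2 = 0 ∨ Int.lor a 2 = 1 ∨ Int.lor a 2 = 2 ∨ Int.lor a 2 = 3 := by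
          rcases ha with rfl | rfl | rfl | rfl <;> decide
        rw [ih (Int.lor a 2) ha']
        have hconf : (∃ y ∈ x :: xs, (PySem.Dict.mk y).get? "status" = some "conflict") := ⟨x, List.mem_cons_self, h2⟩
        have hres : (∃ y ∈ x :: xs, (PySem.Dict.mk y).get? "status" = some "resolved")
            ↔ (∃ y ∈ xs, (PySem.Dict.mk y).get? "status" = some "resolved") := by
          constructor
          · rintro ⟨y, hy, hp⟩
            rcases List.mem_cons.mp hy with rfl | hy
            · exact absurd hp h1
            · exact ⟨y, hy, hp⟩
          · rintro ⟨y, hy, hp⟩; exact ⟨y, List.mem_cons_of_mem _ hy, hp⟩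
        simp only [hconf, if_pos, hres]
        by_cases hr : (∃ y ∈ xs, (PySem.Dict.mk y).get? "status" = some "resolved") <;>
          by_cases hc : (∃ y ∈ xs, (PySem.Dict.mk y).get? "status" = some "conflict") <;>
            simp only [hr, hc, if_pos, if_neg, not_false_iff] <;>
              rcases ha with rfl | rfl | rfl | rfl <;> decide
      · have hb1 : ((PySem.Dict.mk x).get? "status" == some "resolved") = false := by simp [h1]
        have hb2 : ((PySem.Dict.mk x).get? "status" == some "conflict") = false := by simp [h2]
        simp only [hb1, hb2, if_neg, Bool.false_eq_true, not_false_iff]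
        have ha' : Int.lor a 0 = 0 ∨ Int.lor a 0 = 1 ∨ Int.lor a 0 = 2 ∨ Int.lor a 0 = 3 := by
          rcases ha with rfl | rfl | rfl | rfl <;> decide
        rw [ih (Int.lor a 0) ha']
        have hres : (∃ y ∈ x :: xs, (PySem.Dict.mk y).get? "status" = some "resolved")
            ↔ (∃ y ∈ xs, (PySem.Dict.mk y).get? "status" = some "resolved") := by
          constructor
          · rintro ⟨y, hy, hp⟩
            rcases List.mem_cons.mp hy with rfl | hy
            · exact absurd hp h1
            · exact ⟨y, hy, hp⟩
          · rintro ⟨y, hy, hp⟩; exact ⟨y, List.mem_cons_of_mem _ hy, hp⟩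
        have hconf : (∃ y ∈ x :: xs, (PySem.Dict.mk y).get? "status" = some "conflict")
            ↔ (∃ y ∈ xs, (PySem.Dict.mk y).get? "status" = some "conflict") := by
          constructor
          · rintro ⟨y, hy, hp⟩
            rcases List.mem_cons.mp hy with rfl | hy
            · exact absurd hp h2
            · exact ⟨y, hy, hp⟩
          · rintro ⟨y, hy, hp⟩; exact ⟨y, List.mem_cons_of_mem _ hy, hp⟩
        simp only [hres, hconf]
        by_cases hr : (∃ y ∈ xs, (PySem.Dict.mk y).get? "status" = some "resolved") <;>
          by_cases hc : (∃ y ∈ xs, (PySem.Dict.mk y).get? "status" = some "conflict") <;>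
            simp only [hr, hc, if_pos, if_neg, not_false_iff] <;>
              rcases ha with rfl | rfl | rfl | rfl <;> decide

-- ===== VERDICT (by name: the statement is the Claim_ definition above) =====
theorem source_fusion_priority_classification_py_spec : Claim_equal_source_fusion_priority_classification_py := by
  intro fs _ _
  unfold Spec_source_fusion_priority_classification_py
  unfold source_fusion_priority_classification_py source_fusion_priority_classification_py_alt
  simp only [PySem.List.foldl_add, zero_add]
  rw [pvMask_eq fs 0 (Or.inl rfl)]
  have er : ((fs.map (fun x => if (PySem.Dict.mk x).get? "status" == some "resolved" then (1 : Int) else 0)).sum != 0)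
      = decide (∃ x ∈ fs, (PySem.Dict.mk x).get? "status" = some "resolved") := by
    rw [Bool.eq_iff_iff]
    simp [← pvCount_ne_zero_iff fs "resolved"]
  have ec : ((fs.map (fun x => if (PySem.Dict.mk x).get? "status" == some "conflict" then (1 : Int) else 0)).sum != 0)
      = decide (∃ x ∈ fs, (PySem.Dict.mk x).get? "status" = some "conflict") := by
    rw [Bool.eq_iff_iff]
    simp [← pvCount_ne_zero_iff fs "conflict"]
  rw [er, ec]
  by_cases hr : (∃ x ∈ fs, (PySem.Dict.mk x).get? "status" = some "resolved") <;>
    by_cases hc : (∃ x ∈ fs, (PySem.Dict.mk x).get? "status" = some "conflict") <;>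
      simp only [hr, hc, if_pos, if_neg, not_false_iff, decide_true, decide_false] <;> decide
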